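-- pv_equiv track=rewrite | github.com/quantumlib/OpenFermion-FQE | build/lib/fqe/util.py | paritysort
-- ===== SOURCE A (Python) =====
-- def paritysort(arr):
--     """Move all even numbers to the left and all odd numbers to the right
--
--     Args:
--         arr list[int] - a list of integers to be sorted
--
--     Returns:
--         arr [list] - mutated in place
--         swap_count (int) - number of exchanges needed to complete the sorting
--     """
--     larr = len(arr)
--     _parr = [[i % 2, i] for i in arr]
--
--     swap_count = 0
--     for i in range(larr):
--         swapped = False
--         for j in range(0, larr-i-1):
--             if _parr[j][0] > _parr[j+1][0]:
--                 _parr[j], _parr[j+1] = _parr[j+1], _parr[j]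
--                 swapped = True
--                 swap_count += 1
--         if not swapped:
--             break
--
--     for indx, val in enumerate(_parr):
--         arr[indx] = val[1]
--
--     return swap_count
-- ===== SOURCE B (Python) =====
-- def paritysort(arr):
--     """Move all even numbers to the left and all odd numbers to the right
--
--     Single pass: the swap count of the parity bubble sort equals the number of
--     (odd, even) inversions; the mutated arr is the stable parity partition.
--     """
--     odds_seen = 0
--     swap_count = 0
--     evens = []
--     odds = []
--     for x in arr:
--         if x % 2:
--             odds.append(x)
--             odds_seen += 1
--         else:
--             evens.append(x)
--             swap_count += odds_seen
--     arr[:] = evens + odds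
--     return swap_count
-- ===== Notes on version B (the rewrite author's own statement) =====
-- stated objective: faster
-- what changed: Replaces the bubble sort over (parity, value) pairs by a single pass that counts, for each even element, the odd elements seen before it (the inversion count), and rebuilds arr as a stable parity partition.
import Mathlib
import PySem

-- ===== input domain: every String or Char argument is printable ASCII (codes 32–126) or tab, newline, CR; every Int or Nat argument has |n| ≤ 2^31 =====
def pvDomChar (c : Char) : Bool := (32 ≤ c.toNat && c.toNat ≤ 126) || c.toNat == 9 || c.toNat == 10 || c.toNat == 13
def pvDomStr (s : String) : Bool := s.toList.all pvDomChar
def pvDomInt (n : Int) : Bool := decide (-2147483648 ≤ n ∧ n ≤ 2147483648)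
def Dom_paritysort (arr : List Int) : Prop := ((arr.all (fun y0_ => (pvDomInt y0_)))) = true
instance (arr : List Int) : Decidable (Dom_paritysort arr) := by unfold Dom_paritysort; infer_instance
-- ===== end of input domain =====

-- B replaces A's O(n^2) parity bubble sort by a single O(n) pass counting odd-before-even
-- inversions (equivalence proved for the returned swap count; both mutate arr to the same
-- stable parity partition in Python).


-- ===== PORT A =====
-- inner 'for j in range(0, larr-i-1)' loop: compares/swaps adjacent pairs of the first n+1
-- elements, returning the new list and the number of swaps ('swapped' is 'count ≠ 0')
def passA : Nat → List (Int × Int) → List (Int × Int) × Nat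
  | 0, l => (l, 0)
  | _+1, [] => ([], 0)
  | _+1, [a] => ([a], 0)
  | n+1, a :: b :: t =>
    if a.1 > b.1 then
      match passA n (a :: t) with
      | (r, c) => (b :: r, c + 1)
    else
      match passA n (b :: t) with
      | (r, c) => (a :: r, c)

-- outer 'for i in range(larr)' loop with the 'if not swapped: break'
def outerA : Nat → List (Int × Int) → Int → Int
  | 0, _, acc => acc
  | m+1, l, acc =>
    match passA m l with
    | (l', c) => if c = 0 then acc + (c : Int) else outerA m l' (acc + (c : Int))

def paritysort (arr : List Int) : Int :=
  outerA arr.length (arr.map (fun i => (PySem.Int.mod i 2, i))) 0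

-- ===== PORT B =====
-- one pass: state = (odds seen so far, swap count); each even adds the odds before it
def paritysort_alt (arr : List Int) : Int :=
  (arr.foldl
    (fun s x => if PySem.Int.mod x 2 ≠ 0 then (s.1 + 1, s.2) else (s.1, s.2 + s.1))
    ((0 : Int), (0 : Int))).2

-- ===== PRECONDITION & SPEC =====
def Spec_paritysort (arr : List Int) (out : Int) : Prop := out = paritysort_alt arr
instance (arr : List Int) (out : Int) : Decidable (Spec_paritysort arr out) := by unfold Spec_paritysort; infer_instance

-- ===== CLAIM (what is proved, stated in full; the proofs are below) =====
def Claim_equal_paritysort : Prop := ∀ (arr : List Int), Dom_paritysort arr → Spec_paritysort arr (paritysort arr)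

-- ===== LEMMAS AND PROOFS =====

-- inversion count of a key list (pairs i < j with key_i > key_j)
def invk : List Int → Nat
  | [] => 0
  | a :: t => t.countP (fun b => decide (b < a)) + invk t

-- inversion count of A's pair list by first component
def invP (l : List (Int × Int)) : Nat := invk (l.map Prod.fst)

def cntLt (x : Int × Int) (l : List (Int × Int)) : Nat :=
  l.countP (fun b => decide (b.1 < x.1))

theorem invP_cons (x : Int × Int) (t : List (Int × Int)) :
    invP (x :: t) = cntLt x t + invP t := by
  simp [invP, invk, cntLt, List.countP_map]; rfl

theorem cntLt_cons (x b : Int × Int) (t : List (Int × Int)) :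
    cntLt x (b :: t) = (if b.1 < x.1 then 1 else 0) + cntLt x t := by
  simp [cntLt, List.countP_cons]; split <;> omega

theorem cntLt_perm (x : Int × Int) {l l' : List (Int × Int)} (h : l.Perm l') :
    cntLt x l = cntLt x l' := h.countP_eq _

-- "every element at a position >= m is >= everything before it" (suffix already in place)
def Sinv (l : List (Int × Int)) (m : Nat) : Prop :=
  ∀ j, m ≤ j → ∀ q, l[j]? = some q → ∀ p ∈ l.take j, p.1 ≤ q.1

theorem passA_perm (n : Nat) (l : List (Int × Int)) : (passA n l).1.Perm l := by
  fun_induction passA n l with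
  | case1 l => simp
  | case2 => simp
  | case3 => simp
  | case4 n a b t h r c heq ih =>
      exact ((heq ▸ ih).cons b).trans (List.Perm.swap a b t)
  | case5 n a b t h r c heq ih =>
      exact (heq ▸ ih).cons a

theorem passA_drop (n : Nat) (l : List (Int × Int)) :
    (passA n l).1.drop (n + 1) = l.drop (n + 1) := by
  fun_induction passA n l with
  | case1 l => simp
  | case2 => simp
  | case3 => simp
  | case4 n a b t h r c heq ih => rw [heq] at ih; simpa using ih
  | case5 n a b t h r c heq ih => rw [heq] at ih; simpa using ih

theorem passA_zero_eq (n : Nat) (l : List (Int × Int)) (h : (passA n l).2 = 0) :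
    (passA n l).1 = l := by
  fun_induction passA n l with
  | case1 l => rfl
  | case2 => rfl
  | case3 => rfl
  | case4 n a b t h' r c heq ih => simp at h
  | case5 n a b t h' r c heq ih => rw [heq] at ih; simp_all

theorem passA_inv (n : Nat) (l : List (Int × Int)) :
    invP l = (passA n l).2 + invP (passA n l).1 := by
  fun_induction passA n l with
  | case1 l => simp
  | case2 => simp
  | case3 => simp
  | case4 n a b t h r c heq ih =>
      rw [heq] at ih
      have hperm : cntLt b r = cntLt b (a :: t) :=
        cntLt_perm b (by have := passA_perm n (a :: t); rwa [heq] at this)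
      simp only [invP_cons, cntLt_cons] at *
      have hba : ¬ a.1 < b.1 := by omega
      simp only [if_pos h, if_neg hba] at *
      omega
  | case5 n a b t h r c heq ih =>
      rw [heq] at ih
      have hperm : cntLt a r = cntLt a (b :: t) :=
        cntLt_perm a (by have := passA_perm n (b :: t); rwa [heq] at this)
      simp only [invP_cons, cntLt_cons] at *
      omega

theorem passA_head_le (n : Nat) (x : Int × Int) (t : List (Int × Int)) (p : Int × Int)
    (h : (passA n (x :: t)).1[n]? = some p) : x.1 ≤ p.1 := by
  induction n generalizing x t p with
  | zero => simp [passA] at h; exact h ▸ le_refl _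
  | succ n ih =>
      match t with
      | [] => simp [passA] at h
      | b :: t =>
        by_cases hc : x.1 > b.1
        · simp only [passA, if_pos hc] at h
          rcases hq : passA n (x :: t) with ⟨r, c⟩
          rw [hq] at h
          simp only [List.getElem?_cons_succ] at h
          exact ih x t p (by rw [hq]; exact h)
        · simp only [passA, if_neg hc] at h
          rcases hq : passA n (b :: t) with ⟨r, c⟩
          rw [hq] at h
          simp only [List.getElem?_cons_succ] at h
          have := ih b t p (by rw [hq]; exact h)
          omega

theorem passA_all_le (n : Nat) (l : List (Int × Int)) (i : Nat) (p q : Int × Int)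
    (hi : i < n) (hp : (passA n l).1[i]? = some p) (hq : (passA n l).1[n]? = some q) :
    p.1 ≤ q.1 := by
  induction n generalizing l i p q with
  | zero => omega
  | succ n ih =>
      match l with
      | [] => simp [passA] at hq
      | [a] => simp [passA] at hq
      | a :: b :: t =>
        by_cases hc : a.1 > b.1
        · simp only [passA, if_pos hc] at hp hq
          rcases hr : passA n (a :: t) with ⟨r, c⟩
          rw [hr] at hp hq
          simp only [List.getElem?_cons_succ] at hq
          have haq : a.1 ≤ q.1 := passA_head_le n a t q (by rw [hr]; exact hq)
          match i with
          | 0 =>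
              simp only [List.getElem?_cons_zero, Option.some.injEq] at hp
              subst hp; omega
          | k + 1 =>
              simp only [List.getElem?_cons_succ] at hp
              exact ih (a :: t) k p q (by omega) (by rw [hr]; exact hp) (by rw [hr]; exact hq)
        · simp only [passA, if_neg hc] at hp hq
          rcases hr : passA n (b :: t) with ⟨r, c⟩
          rw [hr] at hp hq
          simp only [List.getElem?_cons_succ] at hq
          have hbq : b.1 ≤ q.1 := passA_head_le n b t q (by rw [hr]; exact hq)
          match i with
          | 0 =>
              simp only [List.getElem?_cons_zero, Option.some.injEq] at hp
              subst hp; omega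
          | k + 1 =>
              simp only [List.getElem?_cons_succ] at hp
              exact ih (b :: t) k p q (by omega) (by rw [hr]; exact hp) (by rw [hr]; exact hq)

theorem passA_zero_chain (n : Nat) (l : List (Int × Int)) (h : (passA n l).2 = 0)
    (j : Nat) (hj : j < n) (p q : Int × Int)
    (hp : l[j]? = some p) (hq : l[j + 1]? = some q) : p.1 ≤ q.1 := by
  induction n generalizing l j p q with
  | zero => omega
  | succ n ih =>
      match l with
      | [] => simp at hp
      | [a] => match j with
               | 0 => simp at hq
               | k+1 => simp at hp
      | a :: b :: t =>
        by_cases hc : a.1 > b.1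
        · simp only [passA, if_pos hc] at h
          rcases hr : passA n (a :: t) with ⟨r, c⟩
          rw [hr] at h
          simp at h
        · simp only [passA, if_neg hc] at h
          rcases hr : passA n (b :: t) with ⟨r, c⟩
          rw [hr] at h
          simp only at h
          match j with
          | 0 =>
              simp only [List.getElem?_cons_zero, Option.some.injEq] at hp
              simp only [List.getElem?_cons_succ, List.getElem?_cons_zero,
                Option.some.injEq] at hq
              subst hp; subst hq; omega
          | k + 1 =>
              simp only [List.getElem?_cons_succ] at hp hq
              exact ih (b :: t) (by rw [hr]; exact h) k (by omega) p q hp hq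

theorem mem_take_iff {A : Type} (l : List A) (j : Nat) (a : A) :
    a ∈ l.take j ↔ ∃ i, i < j ∧ l[i]? = some a := by
  induction l generalizing j with
  | nil => cases j <;> simp
  | cons x t ih =>
    cases j with
    | zero => simp
    | succ j =>
      simp only [List.take_succ_cons, List.mem_cons, ih]
      constructor
      · rintro (rfl | ⟨i, hi, hgi⟩)
        · exact ⟨0, by omega, rfl⟩
        · exact ⟨i + 1, by omega, by simpa using hgi⟩
      · rintro ⟨i, hi, hgi⟩
        match i with
        | 0 =>
            left
            simp only [List.getElem?_cons_zero, Option.some.injEq] at hgi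
            exact hgi.symm
        | i + 1 => right; exact ⟨i, by omega, by simpa using hgi⟩

theorem pairwise_invP_zero (l : List (Int × Int))
    (h : l.Pairwise (fun p q => p.1 ≤ q.1)) : invP l = 0 := by
  induction l with
  | nil => simp [invP, invk]
  | cons x t ih =>
    rcases List.pairwise_cons.mp h with ⟨hx, ht⟩
    rw [invP_cons, ih ht, cntLt]
    simp only [Nat.add_zero]
    rw [List.countP_eq_zero]
    intro b hb
    simpa using not_lt.mpr (hx b hb)

theorem Sinv_step (l : List (Int × Int)) (m : Nat) (h : Sinv l (m + 1)) :
    Sinv (passA m l).1 m := by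
  intro j hj q hq p hp
  have hperm := passA_perm m l
  have hdrop := passA_drop m l
  rcases Nat.eq_or_lt_of_le hj with heq | hjm
  · obtain ⟨i, hi, hip⟩ := (mem_take_iff _ _ _).mp hp
    exact passA_all_le m l i p q (heq ▸ hi) hip (heq ▸ hq)
  · -- j ≥ m + 1
    have hj1 : m + 1 ≤ j := hjm
    have hqj : l[j]? = some q := by
      have h1 : ((passA m l).1.drop (m + 1))[j - (m + 1)]? = (l.drop (m + 1))[j - (m + 1)]? := by
        rw [hdrop]
      rw [List.getElem?_drop, List.getElem?_drop] at h1
      have hidx : m + 1 + (j - (m + 1)) = j := by omega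
      rw [hidx] at h1
      rw [← h1]; exact hq
    have htperm : ((passA m l).1.take (m + 1)).Perm (l.take (m + 1)) := by
      have h2 : ((passA m l).1.take (m + 1) ++ (passA m l).1.drop (m + 1)).Perm
          (l.take (m + 1) ++ l.drop (m + 1)) := by
        simpa [List.take_append_drop] using hperm
      rw [hdrop] at h2
      exact (List.perm_append_right_iff _).mp h2
    have hpl : p ∈ l.take j := by
      have hsplit : (passA m l).1.take j
          = (passA m l).1.take (m + 1) ++ ((passA m l).1.drop (m + 1)).take (j - (m + 1)) := by
        rw [← List.take_add]
        congr 1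
        omega
      rw [hsplit] at hp
      have hlsplit : l.take j = l.take (m + 1) ++ (l.drop (m + 1)).take (j - (m + 1)) := by
        rw [← List.take_add]
        congr 1
        omega
      rw [hlsplit]
      rcases List.mem_append.mp hp with h3 | h3
      · exact List.mem_append.mpr (Or.inl (htperm.mem_iff.mp h3))
      · rw [hdrop] at h3
        exact List.mem_append.mpr (Or.inr h3)
    exact h j (by omega) q hqj p hpl

theorem Sinv_pairwise_of_chain (l : List (Int × Int)) (m : Nat) (h : Sinv l (m + 1))
    (hc : ∀ j, j < m → ∀ p q, l[j]? = some p → l[j + 1]? = some q → p.1 ≤ q.1) :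
    l.Pairwise (fun p q => p.1 ≤ q.1) := by
  have chain : ∀ j, j ≤ m → ∀ (hjl : j < l.length), ∀ i (hi : i < j), l[i].1 ≤ l[j].1 := by
    intro j
    induction j with
    | zero => omega
    | succ j ihj =>
      intro hjm hjl i hij
      have hstep : l[j].1 ≤ l[j + 1].1 :=
        hc j (by omega) _ _ (List.getElem?_eq_getElem (by omega)) (List.getElem?_eq_getElem hjl)
      rcases Nat.lt_or_ge i j with hij' | hij'
      · exact le_trans (ihj (by omega) (by omega) i hij') hstep
      · have : i = j := by omega
        subst this; exact hstep
  rw [List.pairwise_iff_getElem]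
  intro i j hi hj hij
  rcases Nat.lt_or_ge j (m + 1) with hjm | hjm
  · exact chain j (by omega) hj i hij
  · apply h j hjm l[j] (List.getElem?_eq_getElem hj) l[i]
    exact (mem_take_iff _ _ _).mpr ⟨i, hij, List.getElem?_eq_getElem hi⟩

theorem Sinv_mono (l : List (Int × Int)) (m m' : Nat) (hmm : m ≤ m') (h : Sinv l m) :
    Sinv l m' := fun j hj => h j (le_trans hmm hj)

theorem outerA_eq (m : Nat) (l : List (Int × Int)) (acc : Int) (h : Sinv l m) :
    outerA m l acc = acc + (invP l : Int) := by
  induction m generalizing l acc with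
  | zero =>
      have hp : l.Pairwise (fun p q => p.1 ≤ q.1) :=
        Sinv_pairwise_of_chain l 0 (Sinv_mono l 0 1 (by omega) h) (by omega)
      simp [outerA, pairwise_invP_zero l hp]
  | succ m ih =>
      rcases hr : passA m l with ⟨l', c⟩
      have hinv := passA_inv m l
      rw [hr] at hinv
      simp only [outerA, hr]
      by_cases hc : c = 0
      · subst hc
        have hl' : l' = l := by have := passA_zero_eq m l (by rw [hr]); rwa [hr] at this
        have hchain := passA_zero_chain m l (by rw [hr])
        have hp := Sinv_pairwise_of_chain l m h hchain
        simp [pairwise_invP_zero l hp]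
      · have hstep : Sinv l' m := by have := Sinv_step l m h; rwa [hr] at this
        simp only [if_neg hc]
        rw [ih l' _ hstep]
        simp only [hinv]
        push_cast
        ring

theorem countP_lt_one (ks : List Int) (hk : ∀ b ∈ ks, b = 0 ∨ b = 1) :
    ks.countP (fun b => decide (b < 1)) = ks.countP (fun b => decide (b = 0)) := by
  apply List.countP_congr
  intro b hb
  rcases hk b hb with rfl | rfl <;> simp

theorem countP_lt_zero (ks : List Int) (hk : ∀ b ∈ ks, b = 0 ∨ b = 1) :
    ks.countP (fun b => decide (b < 0)) = 0 := by
  rw [List.countP_eq_zero]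
  intro b hb
  rcases hk b hb with rfl | rfl <;> simp

theorem alt_fold (l : List Int) (o c : Int) :
    (l.foldl
      (fun s x => if PySem.Int.mod x 2 ≠ 0 then (s.1 + 1, s.2) else (s.1, s.2 + s.1))
      (o, c)).2
      = c + o * ((l.countP (fun x => decide (PySem.Int.mod x 2 = 0)) : Nat) : Int)
          + ((invk (l.map (fun x => PySem.Int.mod x 2)) : Nat) : Int) := by
  induction l generalizing o c with
  | nil => simp [invk]
  | cons x t ih =>
    have hkeys : ∀ b ∈ t.map (fun x => PySem.Int.mod x 2), b = 0 ∨ b = 1 := by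
      intro b hb
      rcases List.mem_map.mp hb with ⟨y, _, rfl⟩
      exact PySem.Int.mod_two_eq y
    rcases PySem.Int.mod_two_eq x with hx | hx
    · -- even
      simp only [List.foldl_cons, hx, ne_eq, not_true_eq_false, if_false,
        List.countP_cons, List.map_cons, invk]
      rw [ih, countP_lt_zero _ hkeys]
      simp
      ring
    · -- odd
      simp only [List.foldl_cons, hx, List.countP_cons, List.map_cons, invk]
      rw [if_pos (by simp)]
      rw [ih]
      rw [countP_lt_one _ hkeys]
      have hmapcnt : (t.map fun x => PySem.Int.mod x 2).countP (fun b => decide (b = 0))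
          = t.countP (fun x => decide (PySem.Int.mod x 2 = 0)) := by
        rw [List.countP_map]; rfl
      rw [hmapcnt]
      simp
      ring

-- ===== VERDICT (by name: the statement is the Claim_ definition above) =====
theorem paritysort_spec : Claim_equal_paritysort := by
  intro arr _
  unfold Spec_paritysort paritysort paritysort_alt
  have hlen : (arr.map (fun i => (PySem.Int.mod i 2, i))).length = arr.length := by simp
  have hS : Sinv (arr.map (fun i => (PySem.Int.mod i 2, i))) arr.length := by
    intro j hj q hq
    rw [List.getElem?_eq_none (by omega : (arr.map (fun i => (PySem.Int.mod i 2, i))).length ≤ j)] at hq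
    exact absurd hq (by simp)
  rw [outerA_eq arr.length _ 0 hS, alt_fold arr 0 0]
  have hmap : (arr.map (fun i => (PySem.Int.mod i 2, i))).map Prod.fst
      = arr.map (fun x => PySem.Int.mod x 2) := by
    rw [List.map_map]; rfl
  rw [invP, hmap]
  ring
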